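-- pv_equiv track=rewrite | github.com/tubri-github/Fn2Report | buildSynm.py | _get_category_for_word
-- ===== SOURCE A (Python) =====
-- def _get_category_for_word(word):
--     """
--     确定单词所属的类别
--     """
--     category_keywords = {
--         "water_bodies": ["river", "lake", "bayou", "creek", "pond", "reservoir", "gulf"],
--         "directions": ["north", "south", "east", "west", "northeast", "northwest"],
--         "distances": ["mile", "km", "meter", "foot", "yard", "distance"],
--         "relative_positions": ["near", "at", "above", "below", "mouth", "junction"],
--         "admin_areas": ["county", "parish", "township", "city", "town", "state"],
--         "roads": ["highway", "route", "road", "street", "avenue", "boulevard"],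
--         "geographical_features": ["island", "swamp", "marsh", "mountain", "valley", "hill"]
--     }
--
--     for category, keywords in category_keywords.items():
--         if word.lower() in keywords:
--             return category
--
--     return None
-- ===== SOURCE B (Python) =====
-- _KEYWORD_TO_CATEGORY = {
--     "river": "water_bodies", "lake": "water_bodies", "bayou": "water_bodies",
--     "creek": "water_bodies", "pond": "water_bodies", "reservoir": "water_bodies",
--     "gulf": "water_bodies",
--     "north": "directions", "south": "directions", "east": "directions",
--     "west": "directions", "northeast": "directions", "northwest": "directions",
--     "mile": "distances", "km": "distances", "meter": "distances",
--     "foot": "distances", "yard": "distances", "distance": "distances",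
--     "near": "relative_positions", "at": "relative_positions", "above": "relative_positions",
--     "below": "relative_positions", "mouth": "relative_positions", "junction": "relative_positions",
--     "county": "admin_areas", "parish": "admin_areas", "township": "admin_areas",
--     "city": "admin_areas", "town": "admin_areas", "state": "admin_areas",
--     "highway": "roads", "route": "roads", "road": "roads",
--     "street": "roads", "avenue": "roads", "boulevard": "roads",
--     "island": "geographical_features", "swamp": "geographical_features", "marsh": "geographical_features",
--     "mountain": "geographical_features", "valley": "geographical_features", "hill": "geographical_features",
-- }
--
--
-- def _get_category_for_word(word):
--     return _KEYWORD_TO_CATEGORY.get(word.lower())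
-- ===== Notes on version B (the rewrite author's own statement) =====
-- stated objective: simpler
-- what changed: Replaced the per-call loop over a dict of category keyword lists (membership scan in each list) by a single flat module-level keyword-to-category dict and one .get(word.lower()) lookup.
import Mathlib
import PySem

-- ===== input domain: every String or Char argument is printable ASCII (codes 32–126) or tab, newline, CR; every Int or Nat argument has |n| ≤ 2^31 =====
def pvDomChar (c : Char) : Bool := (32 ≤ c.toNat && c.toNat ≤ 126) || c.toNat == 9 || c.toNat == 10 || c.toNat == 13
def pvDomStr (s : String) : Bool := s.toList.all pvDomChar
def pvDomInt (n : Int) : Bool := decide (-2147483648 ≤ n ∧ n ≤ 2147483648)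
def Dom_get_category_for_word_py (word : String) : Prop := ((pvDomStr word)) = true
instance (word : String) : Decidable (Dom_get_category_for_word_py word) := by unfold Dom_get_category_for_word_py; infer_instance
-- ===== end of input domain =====

-- B replaces A's per-call dict-of-lists scan by one flat keyword→category dict looked up once (simpler).

-- ===== PORT A =====
-- A's literal category_keywords dict, in insertion order.
def pvCatKeywords : List (String × List String) :=
  [ ("water_bodies", ["river", "lake", "bayou", "creek", "pond", "reservoir", "gulf"])
  , ("directions", ["north", "south", "east", "west", "northeast", "northwest"])
  , ("distances", ["mile", "km", "meter", "foot", "yard", "distance"])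
  , ("relative_positions", ["near", "at", "above", "below", "mouth", "junction"])
  , ("admin_areas", ["county", "parish", "township", "city", "town", "state"])
  , ("roads", ["highway", "route", "road", "street", "avenue", "boulevard"])
  , ("geographical_features", ["island", "swamp", "marsh", "mountain", "valley", "hill"]) ]

-- the for-loop over .items() with early return
def pvGoA : List (String × List String) → String → Option String
  | [], _ => none
  | (c, ks) :: rest, w => if ks.contains w then some c else pvGoA rest w

def get_category_for_word_py (word : String) : Option String :=
  pvGoA pvCatKeywords (PySem.Str.lower word)

-- ===== PORT B =====
-- B's flat literal dict keyword → category.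
def pvKeywordToCategory : PySem.Dict String String :=
  PySem.Dict.mk
  [ ("river", "water_bodies"), ("lake", "water_bodies"), ("bayou", "water_bodies")
  , ("creek", "water_bodies"), ("pond", "water_bodies"), ("reservoir", "water_bodies")
  , ("gulf", "water_bodies")
  , ("north", "directions"), ("south", "directions"), ("east", "directions")
  , ("west", "directions"), ("northeast", "directions"), ("northwest", "directions")
  , ("mile", "distances"), ("km", "distances"), ("meter", "distances")
  , ("foot", "distances"), ("yard", "distances"), ("distance", "distances")
  , ("near", "relative_positions"), ("at", "relative_positions"), ("above", "relative_positions")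
  , ("below", "relative_positions"), ("mouth", "relative_positions"), ("junction", "relative_positions")
  , ("county", "admin_areas"), ("parish", "admin_areas"), ("township", "admin_areas")
  , ("city", "admin_areas"), ("town", "admin_areas"), ("state", "admin_areas")
  , ("highway", "roads"), ("route", "roads"), ("road", "roads")
  , ("street", "roads"), ("avenue", "roads"), ("boulevard", "roads")
  , ("island", "geographical_features"), ("swamp", "geographical_features"), ("marsh", "geographical_features")
  , ("mountain", "geographical_features"), ("valley", "geographical_features"), ("hill", "geographical_features") ]

def get_category_for_word_py_alt (word : String) : Option String :=
  pvKeywordToCategory.get? (PySem.Str.lower word)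

-- ===== PRECONDITION & SPEC =====
def Spec_get_category_for_word_py (word : String) (out : Option String) : Prop := out = get_category_for_word_py_alt word
instance (word : String) (out : Option String) : Decidable (Spec_get_category_for_word_py word out) := by unfold Spec_get_category_for_word_py; infer_instance

-- ===== CLAIM (what is proved, stated in full; the proofs are below) =====
def Claim_equal_get_category_for_word_py : Prop := ∀ (word : String), Dom_get_category_for_word_py word → Spec_get_category_for_word_py word (get_category_for_word_py word)

-- ===== LEMMAS AND PROOFS =====

-- get? on a flat block of keys all mapped to c, followed by a tail
theorem pv_get?_block (c : String) (ks : List String) (tail : List (String × String)) (w : String) :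
    (PySem.Dict.mk (ks.map (fun k => (k, c)) ++ tail)).get? w
      = if ks.contains w then some c else (PySem.Dict.mk tail).get? w := by
  induction ks with
  | nil => simp
  | cons k ks ih =>
    simp only [List.map_cons, List.cons_append, PySem.Dict.get?_mk_cons, ih, List.contains_cons]
    by_cases h : w = k
    · subst h; simp
    · simp [beq_iff_eq, Ne.symm h, h]

-- A's loop over groups equals lookup in the flattened association list
theorem pv_goA_flat (gs : List (String × List String)) (w : String) :
    pvGoA gs w
      = (PySem.Dict.mk (gs.flatMap fun p => p.2.map fun k => (k, p.1))).get? w := by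
  induction gs with
  | nil => simp [pvGoA, PySem.Dict.get?]
  | cons g rest ih =>
    obtain ⟨c, ks⟩ := g
    simp only [pvGoA, List.flatMap_cons, pv_get?_block, ih]

-- ===== VERDICT (by name: the statement is the Claim_ definition above) =====
theorem get_category_for_word_py_spec : Claim_equal_get_category_for_word_py := by
  intro word _
  unfold Spec_get_category_for_word_py get_category_for_word_py get_category_for_word_py_alt
  rw [pv_goA_flat]
  rfl
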